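-- pv_equiv track=rewrite | github.com/TJ-R/pokemon-battle-assistant | helper.py | findBestMoves
-- ===== SOURCE A (Python) =====
-- def findBestMoves(possible_moves):
--     highest_power = None
--     highest_acc_power = None
--
--     for move in possible_moves:
--         if highest_power is None and highest_acc_power is None:
--             highest_power = move
--             highest_acc_power = move
--         else:
--             if move[0] > highest_power[0]:
--                 highest_power = move
--
--             if move[1] > highest_acc_power[1]:
--                 highest_acc_power = move
--
--     return highest_power, highest_acc_power
-- ===== SOURCE B (Python) =====
-- def findBestMoves(possible_moves):
--     moves = list(possible_moves)
--     if not moves: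
--         return (None, None)
--     by_power = sorted(moves, key=lambda m: m[0], reverse=True)
--     by_acc_power = sorted(moves, key=lambda m: m[1], reverse=True)
--     return by_power[0], by_acc_power[0]
-- ===== Notes on version B (the rewrite author's own statement) =====
-- stated objective: alternative
-- what changed: Replaced A's single fused running-max loop with selection by stable descending sort: sort the moves by each key with reverse=True and take the first element of each sorted list (stability makes that the first maximal element, matching A's strict-> updates).
-- outside the precondition, e.g. on findBestMoves([]): A returns (None, None), B returns (None, None)
import Mathlib
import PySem

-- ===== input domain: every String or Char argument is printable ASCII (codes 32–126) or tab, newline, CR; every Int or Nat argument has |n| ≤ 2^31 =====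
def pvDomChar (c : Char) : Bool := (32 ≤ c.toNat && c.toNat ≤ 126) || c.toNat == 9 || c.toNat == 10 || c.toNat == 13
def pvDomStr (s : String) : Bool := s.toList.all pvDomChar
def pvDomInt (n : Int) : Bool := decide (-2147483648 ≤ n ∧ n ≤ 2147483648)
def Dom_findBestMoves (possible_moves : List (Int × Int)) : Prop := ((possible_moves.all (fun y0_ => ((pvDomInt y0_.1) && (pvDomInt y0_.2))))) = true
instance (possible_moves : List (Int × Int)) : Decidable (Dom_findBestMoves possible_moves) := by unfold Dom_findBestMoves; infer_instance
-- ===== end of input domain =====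

-- B replaces A's fused running-max loop with selection by stable descending sort (take the
-- head of each reverse-sorted list); return-value equivalence on non-empty input.

-- ===== PORT A =====
-- one loop step of A: the None/None initialisation branch, else the two strict-> updates
-- (the 'none' fallbacks in the else branch are unreachable: the state is always
-- both-none or both-some)
def findBestMovesStep (s : Option (Int × Int) × Option (Int × Int)) (move : Int × Int) :
    Option (Int × Int) × Option (Int × Int) :=
  if s.1 = none ∧ s.2 = none then (some move, some move)
  else
    ((match s.1 with
      | some p => if move.1 > p.1 then some move else some p
      | none => none),
     (match s.2 with
      | some q => if move.2 > q.2 then some move else some q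
      | none => none))

def findBestMoves (possible_moves : List (Int × Int)) : (Int × Int) × (Int × Int) :=
  match possible_moves.foldl findBestMovesStep (none, none) with
  | (some p, some q) => (p, q)
  | _ => ((0, 0), (0, 0))   -- Python returns (None, None) here (empty input); outside Pre_

-- ===== PORT B =====
-- two stable reverse sorts; [0] on the (non-empty) sorted lists is the cons-head match
def findBestMoves_alt (possible_moves : List (Int × Int)) : (Int × Int) × (Int × Int) :=
  match PySem.List.sorted possible_moves (fun m => m.1) true,
        PySem.List.sorted possible_moves (fun m => m.2) true with
  | p :: _, q :: _ => (p, q)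
  | _, _ => ((0, 0), (0, 0))   -- Python returns (None, None) here (empty input); outside Pre_

-- ===== PRECONDITION & SPEC =====
-- Pre_ excludes only the empty list, on which A returns (None, None) — not a value of the
-- declared (Int × Int) × (Int × Int) type.
def Pre_findBestMoves (possible_moves : List (Int × Int)) : Prop := possible_moves ≠ []
instance (possible_moves : List (Int × Int)) : Decidable (Pre_findBestMoves possible_moves) := by unfold Pre_findBestMoves; infer_instance
def pvWitness_findBestMoves : (List (Int × Int)) := [(40, 100), (90, 80)]

def Spec_findBestMoves (possible_moves : List (Int × Int)) (out : (Int × Int) × (Int × Int)) : Prop := out = findBestMoves_alt possible_moves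
instance (possible_moves : List (Int × Int)) (out : (Int × Int) × (Int × Int)) : Decidable (Spec_findBestMoves possible_moves out) := by unfold Spec_findBestMoves; infer_instance

-- ===== CLAIM (what is proved, stated in full; the proofs are below) =====
def Claim_equal_findBestMoves : Prop := ∀ (possible_moves : List (Int × Int)), Dom_findBestMoves possible_moves → Pre_findBestMoves possible_moves → Spec_findBestMoves possible_moves (findBestMoves possible_moves)

-- ===== LEMMAS AND PROOFS =====

-- the running-max loop step for a projection key (Python's max/A's strict-> update)
def maxStep (key : Int × Int → Int) (acc : Option (Int × Int)) (x : Int × Int) :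
    Option (Int × Int) :=
  match acc with
  | none => some x
  | some m => if key m < key x then some x else some m

-- the head of a descending insertion only depends on the head of the accumulator,
-- and evolves exactly like the running-max state
lemma head?_insertBy (key : Int × Int → Int) (x : Int × Int) (acc : List (Int × Int)) :
    (PySem.List.insertBy (fun a b => decide (key b < key a)) x acc).head? =
      maxStep key acc.head? x := by
  cases acc with
  | nil => rfl
  | cons y ys =>
    simp only [PySem.List.insertBy, maxStep, List.head?_cons]
    by_cases h : key y < key x <;> simp [h]

lemma head?_foldl_insertBy (key : Int × Int → Int) (xs : List (Int × Int)) :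
    ∀ acc : List (Int × Int),
      (xs.foldl (fun acc x => PySem.List.insertBy (fun a b => decide (key b < key a)) x acc) acc).head?
        = xs.foldl (maxStep key) acc.head? := by
  induction xs with
  | nil => intro acc; rfl
  | cons x t ih =>
    intro acc
    simp only [List.foldl_cons]
    rw [ih, head?_insertBy]

-- the head of the stable reverse sort is the first maximal element = the running max
lemma head?_sorted_rev (key : Int × Int → Int) (xs : List (Int × Int)) :
    (PySem.List.sorted xs key true).head? = xs.foldl (maxStep key) none := by
  rw [PySem.List.sorted_rev_eq_foldl_insertBy, head?_foldl_insertBy]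
  rfl

-- A's fused loop computes the pair of the two independent running maxima,
-- as long as the two accumulators are both none or both some.
lemma foldl_step_pair (t : List (Int × Int)) :
    ∀ (o₁ o₂ : Option (Int × Int)), o₁.isSome = o₂.isSome →
    t.foldl findBestMovesStep (o₁, o₂) =
      (t.foldl (maxStep (fun m => m.1)) o₁, t.foldl (maxStep (fun m => m.2)) o₂) := by
  induction t with
  | nil => intro o₁ o₂ _; rfl
  | cons x t ih =>
    intro o₁ o₂ h
    cases o₁ with
    | none =>
      cases o₂ with
      | none =>
        simp only [List.foldl_cons]
        rw [show findBestMovesStep (none, none) x = (some x, some x) from rfl]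
        exact ih _ _ rfl
      | some q => simp at h
    | some p =>
      cases o₂ with
      | none => simp at h
      | some q =>
        simp only [List.foldl_cons]
        have hstep : findBestMovesStep (some p, some q) x =
            (maxStep (fun m => m.1) (some p) x, maxStep (fun m => m.2) (some q) x) := by
          simp [findBestMovesStep, maxStep]
        rw [hstep]
        apply ih
        simp [maxStep, apply_ite Option.isSome]

-- ===== VERDICT (by name: the statement is the Claim_ definition above) =====
theorem findBestMoves_spec : Claim_equal_findBestMoves := by
  intro pm _ hpre
  obtain ⟨p, t₁, hp⟩ : ∃ p t, PySem.List.sorted pm (fun m => m.1) true = p :: t := by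
    cases hs : PySem.List.sorted pm (fun m => m.1) true with
    | nil => exact absurd ((PySem.List.sorted_eq_nil_iff _ _ _).mp hs) hpre
    | cons p t => exact ⟨p, t, rfl⟩
  obtain ⟨q, t₂, hq⟩ : ∃ q t, PySem.List.sorted pm (fun m => m.2) true = q :: t := by
    cases hs : PySem.List.sorted pm (fun m => m.2) true with
    | nil => exact absurd ((PySem.List.sorted_eq_nil_iff _ _ _).mp hs) hpre
    | cons q t => exact ⟨q, t, rfl⟩
  have h₁ : pm.foldl (maxStep (fun m => m.1)) none = some p := by
    rw [← head?_sorted_rev, hp]; rfl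
  have h₂ : pm.foldl (maxStep (fun m => m.2)) none = some q := by
    rw [← head?_sorted_rev, hq]; rfl
  have hA : pm.foldl findBestMovesStep (none, none) = (some p, some q) := by
    rw [foldl_step_pair pm none none rfl, h₁, h₂]
  unfold Spec_findBestMoves findBestMoves findBestMoves_alt
  rw [hA, hp, hq]
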